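-- pv_equiv track=rewrite | github.com/xihuishawpy/python3_interview_codecheets | coderbyte/hard/patternChaser.py | PatternChaser
-- ===== SOURCE A (Python) =====
-- def PatternChaser(strParam):
--
--     hm = {}
--
--     for i in range(len(strParam)-1):
--         p = strParam[i]
--         for j in range(i+1, len(strParam)):
--             p += strParam[j]
--             cnt = strParam.count(p)
--             if cnt > 1:
--                 hm[p] = cnt
--
--     if not hm:
--         return "no null"
--
--     rtn = sorted(hm, key = lambda x: (-hm[x], -len(x)))[0]
--     return f"yes {rtn}"
-- ===== SOURCE B (Python) =====
-- def PatternChaser(strParam):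
--     n = len(strParam)
--     best = None  # (count, length, pattern)
--     L = 2
--     while L <= n:
--         seen = set()
--         repeated = False
--         for i in range(n - L + 1):
--             p = strParam[i:i + L]
--             if p in seen:
--                 repeated = True
--                 continue
--             seen.add(p)
--             cnt = strParam.count(p)
--             if cnt > 1:
--                 if best is None or (cnt, L) > (best[0], best[1]):
--                     best = (cnt, L, p)
--         if not repeated:
--             break
--         L += 1
--     if best is None:
--         return "no null"
--     return "yes " + best[2]
-- ===== Notes on version B (the rewrite author's own statement) =====
-- stated objective: faster
-- what changed: B scans windows length-major with a per-length seen-set so each distinct substring is counted once, and stops at the first length with no repeated window (longer repeats are impossible), keeping a running best instead of A's dict of all repeated substrings plus a sort.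
import Mathlib
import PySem

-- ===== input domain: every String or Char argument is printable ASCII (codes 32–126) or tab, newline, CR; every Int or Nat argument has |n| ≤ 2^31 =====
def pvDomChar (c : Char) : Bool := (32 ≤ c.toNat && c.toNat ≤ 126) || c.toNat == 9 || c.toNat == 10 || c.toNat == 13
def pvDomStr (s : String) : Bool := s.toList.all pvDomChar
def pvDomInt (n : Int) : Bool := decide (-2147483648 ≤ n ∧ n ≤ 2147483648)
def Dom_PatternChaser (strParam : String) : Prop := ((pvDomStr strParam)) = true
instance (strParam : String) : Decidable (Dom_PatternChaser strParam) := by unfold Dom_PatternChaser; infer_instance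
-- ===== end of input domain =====

-- B rewrites A's all-substrings dict + sort as a length-major scan with a per-length seen-set,
-- a running best and an early stop at the first length with no repeated window (objective: faster).

-- ===== PORT A =====
def PatternChaser (strParam : String) : String :=
  let cs := strParam.toList
  let hm : PySem.Dict (List Char) Int :=
    (PySem.List.pyRange 0 ((cs.length : Int) - 1)).foldl
      (fun d i =>
        ((PySem.List.pyRange (i + 1) (cs.length : Int)).foldl
            (fun (st : List Char × PySem.Dict (List Char) Int) j =>
              let p := st.1 ++ [PySem.List.pyGetD cs j ' ']
              let cnt : Int := (PySem.Chars.count cs p : Int)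
              (p, if 1 < cnt then st.2.insert p cnt else st.2))
            ([PySem.List.pyGetD cs i ' '], d)).2)
      PySem.Dict.empty
  if hm.items = [] then "no null"
  else
    match PySem.List.sorted2 hm.keys (fun x => -(hm.getD x 0)) (fun x => -((x.length : Int))) with
    | [] => "no null"
    | r :: _ => String.mk ("yes ".toList ++ r)

-- ===== PORT B =====
def pvBestUpd (cnt L : Int) (p : List Char) (best : Option (Int × Int × List Char)) :
    Option (Int × Int × List Char) :=
  match best with
  | none => some (cnt, L, p)
  | some b => if b.1 < cnt ∨ (cnt = b.1 ∧ b.2.1 < L) then some (cnt, L, p) else some b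

def pvAltLen (cs : List Char) (L : Nat) (best0 : Option (Int × Int × List Char)) :
    Bool × PySem.Set (List Char) × Option (Int × Int × List Char) :=
  (List.range (cs.length - L + 1)).foldl
    (fun st (i : Nat) =>
      let p := PySem.List.slice cs (some (i : Int)) (some ((i : Int) + (L : Int)))
      if st.2.1.contains p then (true, st.2.1, st.2.2)
      else
        let cnt : Int := (PySem.Chars.count cs p : Int)
        (st.1, st.2.1.add p, if 1 < cnt then pvBestUpd cnt (L : Int) p st.2.2 else st.2.2))
    (false, PySem.Set.empty, best0)

def pvAltGo (cs : List Char) (L : Nat) (best : Option (Int × Int × List Char)) :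
    Option (Int × Int × List Char) :=
  if _h : L ≤ cs.length then
    let r := pvAltLen cs L best
    if r.1 then pvAltGo cs (L + 1) r.2.2 else r.2.2
  else best
termination_by cs.length + 1 - L

def PatternChaser_alt (strParam : String) : String :=
  let cs := strParam.toList
  match pvAltGo cs 2 none with
  | none => "no null"
  | some b => String.mk ("yes ".toList ++ b.2.2)

-- ===== PRECONDITION & SPEC =====
def Spec_PatternChaser (strParam : String) (out : String) : Prop := out = PatternChaser_alt strParam
instance (strParam : String) (out : String) : Decidable (Spec_PatternChaser strParam out) := by unfold Spec_PatternChaser; infer_instance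

-- ===== CLAIM (what is proved, stated in full; the proofs are below) =====
def Claim_equal_PatternChaser : Prop := ∀ (strParam : String), Dom_PatternChaser strParam → Spec_PatternChaser strParam (PatternChaser strParam)

-- ===== LEMMAS AND PROOFS =====

/-! Abbreviations used only by the proofs. -/

def pvWin (cs : List Char) (i L : Nat) : List Char := (cs.drop i).take L
def pvCnt (cs p : List Char) : Nat := PySem.Chars.count cs p
def pvI0 (cs p : List Char) : Nat := (PySem.Chars.find cs p).toNat
def pvCandB (cs p : List Char) : Prop :=
  2 ≤ p.length ∧ 1 < pvCnt cs p ∧ pvI0 cs p + p.length ≤ cs.length ∧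
    pvWin cs (pvI0 cs p) p.length = p
def pvPosLt (a b : Nat × Nat) : Prop := a.1 < b.1 ∨ (a.1 = b.1 ∧ a.2 < b.2)
def pvPos (cs p : List Char) : Nat × Nat := (pvI0 cs p, p.length)
def pvTie (cs m x : List Char) : Prop := pvCnt cs m = pvCnt cs x ∧ m.length = x.length
def pvBetter (cs x m : List Char) : Prop :=
  pvCnt cs m < pvCnt cs x ∨ (pvCnt cs x = pvCnt cs m ∧ m.length < x.length)
def pvBetter3 (cs x m : List Char) : Prop :=
  pvBetter cs x m ∨ (pvTie cs x m ∧ pvI0 cs x < pvI0 cs m)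
def pvBetterB (cs x m : List Char) : Bool :=
  decide (pvCnt cs m < pvCnt cs x) || (decide (pvCnt cs x = pvCnt cs m) && decide (m.length < x.length))
def pvBetter3B (cs x m : List Char) : Bool :=
  pvBetterB cs x m || (decide (pvCnt cs x = pvCnt cs m) && decide (x.length = m.length) && decide (pvI0 cs x < pvI0 cs m))
def pvSel (P : List Char → List Char → Bool) (o : Option (List Char)) (x : List Char) :
    Option (List Char) :=
  match o with
  | none => some x
  | some m => if P x m then some x else some m
def pvEnc (cs p : List Char) : Int × Int × List Char := ((pvCnt cs p : Int), (p.length : Int), p)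
def pvStepT (cs : List Char) (b : Option (Int × Int × List Char)) (p : List Char) :
    Option (Int × Int × List Char) :=
  pvBestUpd (pvCnt cs p : Int) (p.length : Int) p b
def pvAIns (cs : List Char) (d : PySem.Dict (List Char) Int) (ps : List (List Char)) :
    PySem.Dict (List Char) Int :=
  ps.foldl (fun d p =>
    if 1 < ((PySem.Chars.count cs p : Int)) then d.insert p ((PySem.Chars.count cs p : Int)) else d) d
def pvC (cs p : List Char) : Bool := decide (1 < pvCnt cs p)
def pvWs (cs : List Char) (L m : Nat) : List (List Char) := (List.range m).map (fun i => pvWin cs i L)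
def pvLBL (cs : List Char) (L : Nat) : List (List Char) :=
  (PySem.Set.ofList (pvWs cs L (cs.length - L + 1))).filter (pvC cs)
def pvPairsA (cs : List Char) : List (Nat × Nat) :=
  (List.range (cs.length - 1)).flatMap (fun i => (List.range (cs.length - 1 - i)).map (fun k => (i, 2 + k)))
def pvLens (cs : List Char) (L : Nat) : List Nat := (List.range (cs.length + 1 - L)).map (fun k => L + k)
def pvKeyList (cs : List Char) : List (List Char) :=
  (PySem.Set.ofList ((pvPairsA cs).map (fun pr => pvWin cs pr.1 pr.2))).filter (pvC cs)
def pvBFull (cs : List Char) : List (List Char) := ((pvLens cs 2).map (pvLBL cs)).flatten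

/-! Basic facts: windows, occurrences, find. -/

theorem pvWin_length (cs : List Char) (i L : Nat) (h : i + L ≤ cs.length) :
    (pvWin cs i L).length = L := by
  simp [pvWin]; omega

theorem pvWin_prefix_drop (cs : List Char) (i L : Nat) : pvWin cs i L <+: cs.drop i :=
  List.take_prefix _ _

theorem pvPrefix_drop_win (cs p : List Char) (i : Nat) (h : p <+: cs.drop i) :
    pvWin cs i p.length = p := by
  have := (List.prefix_iff_eq_take.mp h)
  simpa [pvWin] using this.symm

theorem pvOcc_len_le (cs p : List Char) (i : Nat) (hp : p ≠ []) (h : p <+: cs.drop i) :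
    i + p.length ≤ cs.length := by
  have hlen := h.length_le
  simp [List.length_drop] at hlen
  by_contra hc
  push_neg at hc
  have : p.length = 0 := by omega
  exact hp (List.eq_nil_of_length_eq_zero this)

theorem pvOcc_infix (cs p : List Char) (i : Nat) (h : p <+: cs.drop i) : p <:+: cs := by
  obtain ⟨t, ht⟩ := h
  exact ⟨cs.take i, t, by rw [List.append_assoc, ht, List.take_append_drop]⟩

theorem pvI0_le (cs p : List Char) (i : Nat) (h : p <+: cs.drop i) :
    pvI0 cs p ≤ i ∧ p <+: cs.drop (pvI0 cs p) := by
  have hnn : 0 ≤ PySem.Chars.find cs p :=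
    (PySem.Chars.find_nonneg_iff cs p).mpr (pvOcc_infix cs p i h)
  obtain ⟨h1, h2⟩ := PySem.Chars.find_spec hnn
  refine ⟨?_, h1⟩
  by_contra hc
  push_neg at hc
  exact h2 i hc h

theorem pvCandB_of_occ (cs p : List Char) (i : Nat) (h : p <+: cs.drop i)
    (h2 : 2 ≤ p.length) (hc : 1 < pvCnt cs p) : pvCandB cs p := by
  have hp : p ≠ [] := by intro hp; simp [hp] at h2
  obtain ⟨hle, hocc⟩ := pvI0_le cs p i h
  exact ⟨h2, hc, pvOcc_len_le cs p _ hp hocc, pvPrefix_drop_win cs p _ hocc⟩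

/-! count: two occurrences. -/

theorem pv_go_occ1 (sub : List Char) :
    ∀ (fuel : Nat) (l : List Char) (acc : Nat),
      acc < PySem.Chars.count.go sub fuel l acc → ∃ a, sub <+: l.drop a := by
  intro fuel
  induction fuel with
  | zero => intro l acc h; simp [PySem.Chars.count.go] at h
  | succ fuel ih =>
    intro l acc h
    cases l with
    | nil => simp [PySem.Chars.count.go] at h
    | cons c t =>
      by_cases hp : sub.isPrefixOf (c :: t)
      · exact ⟨0, by simpa using (List.isPrefixOf_iff_prefix.mp hp)⟩
      · rw [PySem.Chars.count.go] at h
        simp only [hp, if_false] at h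
        obtain ⟨a, ha⟩ := ih t acc h
        exact ⟨a + 1, by simpa using ha⟩

theorem pv_go_occ2 (sub : List Char) (hs : sub ≠ []) :
    ∀ (fuel : Nat) (l : List Char) (acc : Nat),
      acc + 2 ≤ PySem.Chars.count.go sub fuel l acc →
      ∃ a b, a < b ∧ sub <+: l.drop a ∧ sub <+: l.drop b := by
  intro fuel
  induction fuel with
  | zero => intro l acc h; simp [PySem.Chars.count.go] at h
  | succ fuel ih =>
    intro l acc h
    cases l with
    | nil => simp [PySem.Chars.count.go] at h
    | cons c t =>
      by_cases hp : sub.isPrefixOf (c :: t)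
      · rw [PySem.Chars.count.go] at h
        simp only [hp, if_true] at h
        have h1 : acc + 1 < PySem.Chars.count.go sub fuel (List.drop sub.length (c :: t)) (acc + 1) := by omega
        obtain ⟨a, ha⟩ := pv_go_occ1 sub fuel _ _ h1
        rw [List.drop_drop] at ha
        refine ⟨0, sub.length + a, ?_, by simpa using (List.isPrefixOf_iff_prefix.mp hp), ?_⟩
        · have : sub.length ≠ 0 := by simpa using hs
          omega
        · exact ha
      · rw [PySem.Chars.count.go] at h
        simp only [hp, if_false] at h
        obtain ⟨a, b, hab, h1, h2⟩ := ih t acc h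
        exact ⟨a + 1, b + 1, by omega, by simpa using h1, by simpa using h2⟩

theorem pvCnt_two (cs p : List Char) (hp : p ≠ []) (h : 1 < pvCnt cs p) :
    ∃ a b, a < b ∧ p <+: cs.drop a ∧ p <+: cs.drop b := by
  have heq : pvCnt cs p = PySem.Chars.count.go p cs.length cs 0 := by
    simp [pvCnt, PySem.Chars.count, List.isEmpty_iff, hp]
  rw [heq] at h
  exact pv_go_occ2 p hp cs.length cs 0 (by omega)

/-! Nodup windows machinery. -/

theorem pvWs_dup (cs : List Char) (L m a b : Nat) (hab : a < b) (hbm : b < m)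
    (heq : pvWin cs a L = pvWin cs b L) : ¬ (pvWs cs L m).Nodup := by
  intro hnd
  have hpw : (List.range m).Pairwise (fun i j => pvWin cs i L ≠ pvWin cs j L) :=
    (List.pairwise_map).mp hnd
  have h := List.pairwise_iff_getElem.mp hpw a b (by simpa using (by omega : a < m)) (by simpa using hbm) hab
  simp only [List.getElem_range] at h
  exact h heq

theorem pvWs_nodup_of_inj (cs : List Char) (L m : Nat)
    (h : ∀ a b, a < b → b < m → pvWin cs a L ≠ pvWin cs b L) : (pvWs cs L m).Nodup := by
  refine (List.pairwise_map).mpr ?_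
  refine List.pairwise_iff_getElem.mpr ?_
  intro i j hi hj hij
  simp only [List.getElem_range]
  exact h i j hij (by simpa using hj)

theorem pvNodup_ws_succ (cs : List Char) (L : Nat)
    (h : (pvWs cs L (cs.length - L + 1)).Nodup) :
    (pvWs cs (L + 1) (cs.length - (L + 1) + 1)).Nodup := by
  apply pvWs_nodup_of_inj
  intro a b hab hbm heq
  have heqL : pvWin cs a L = pvWin cs b L := by
    have hx : ∀ x, pvWin cs x L = (pvWin cs x (L + 1)).take L := by
      intro x
      simp only [pvWin, List.take_take]
      congr 1
      omega
    rw [hx a, hx b, heq]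
  exact pvWs_dup cs L (cs.length - L + 1) a b hab (by omega) heqL h

theorem pvNodup_ws_ge (cs : List Char) (L L' : Nat) (hLL : L ≤ L')
    (h : (pvWs cs L (cs.length - L + 1)).Nodup) :
    (pvWs cs L' (cs.length - L' + 1)).Nodup := by
  induction L', hLL using Nat.le_induction with
  | base => exact h
  | succ L' _ ih => exact pvNodup_ws_succ cs L' ih

/-! Membership characterisations. -/

theorem pvMemA (cs : List Char) (i L : Nat) :
    (i, L) ∈ pvPairsA cs ↔ 2 ≤ L ∧ i + L ≤ cs.length := by
  simp only [pvPairsA, List.mem_flatMap, List.mem_map, List.mem_range, Prod.mk.injEq]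
  constructor
  · rintro ⟨i', hi', k, hk, rfl, rfl⟩
    omega
  · rintro ⟨h2, hle⟩
    exact ⟨i, by omega, ⟨L - 2, by omega, rfl, by omega⟩⟩

theorem pvMemWinPairsA (cs p : List Char) :
    ((∃ pr ∈ pvPairsA cs, pvWin cs pr.1 pr.2 = p) ∧ 1 < pvCnt cs p) ↔ pvCandB cs p := by
  constructor
  · rintro ⟨⟨⟨i, L⟩, hpr, rfl⟩, hc⟩
    dsimp only at hc ⊢
    obtain ⟨h2, hle⟩ := (pvMemA cs i L).mp hpr
    have hlen := pvWin_length cs i L hle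
    exact pvCandB_of_occ cs _ i (pvWin_prefix_drop cs i L) (by omega) hc
  · rintro ⟨h2, hc, hle, hwin⟩
    exact ⟨⟨(pvI0 cs p, p.length), (pvMemA cs _ _).mpr ⟨h2, hle⟩, hwin⟩, hc⟩

theorem pvMemKeyList (cs p : List Char) : p ∈ pvKeyList cs ↔ pvCandB cs p := by
  rw [← pvMemWinPairsA]
  simp only [pvKeyList, List.mem_filter, PySem.Set.mem_ofList, List.mem_map, pvC,
    decide_eq_true_eq]

theorem pvMemLBL (cs p : List Char) (L : Nat) (h2 : 2 ≤ L) (hn : L ≤ cs.length) :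
    p ∈ pvLBL cs L ↔ pvCandB cs p ∧ p.length = L := by
  simp only [pvLBL, List.mem_filter, PySem.Set.mem_ofList, pvWs, List.mem_map, List.mem_range, pvC,
    decide_eq_true_eq]
  constructor
  · rintro ⟨⟨i, hi, rfl⟩, hc⟩
    have hle : i + L ≤ cs.length := by omega
    have hlen := pvWin_length cs i L hle
    exact ⟨pvCandB_of_occ cs _ i (pvWin_prefix_drop cs i L) (by omega) hc, hlen⟩
  · rintro ⟨⟨hl2, hc, hle, hwin⟩, rfl⟩
    exact ⟨⟨pvI0 cs p, by omega, hwin⟩, hc⟩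

theorem pvMemBFull (cs p : List Char) : p ∈ pvBFull cs ↔ pvCandB cs p := by
  simp only [pvBFull, List.mem_flatten, List.mem_map, pvLens]
  constructor
  · rintro ⟨_, ⟨L, ⟨k, hk, rfl⟩, rfl⟩, hp⟩
    simp only [List.mem_range] at hk
    exact ((pvMemLBL cs p _ (by omega) (by omega)).mp hp).1
  · intro hp
    have h2 := hp.1
    have hle := hp.2.2.1
    have hLn : p.length ≤ cs.length := by omega
    refine ⟨pvLBL cs p.length, ⟨p.length, ⟨p.length - 2, by simp; omega, by omega⟩, rfl⟩, ?_⟩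
    exact (pvMemLBL cs p p.length h2 hLn).mpr ⟨hp, rfl⟩

theorem pvLBL_nil_of_nodup (cs : List Char) (L : Nat) (h2 : 2 ≤ L) (hn : L ≤ cs.length)
    (hnd : (pvWs cs L (cs.length - L + 1)).Nodup) : pvLBL cs L = [] := by
  rw [List.eq_nil_iff_forall_not_mem]
  intro p hp
  obtain ⟨hcand, hlen⟩ := (pvMemLBL cs p L h2 hn).mp hp
  have hpne : p ≠ [] := by intro hp0; rw [hp0] at hlen; simp at hlen; omega
  obtain ⟨a, b, hab, ha, hb⟩ := pvCnt_two cs p hpne hcand.2.1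
  have hbl : b + L ≤ cs.length := by
    have := pvOcc_len_le cs p b hpne hb
    omega
  have hwa : pvWin cs a L = p := by rw [← hlen]; exact pvPrefix_drop_win cs p a ha
  have hwb : pvWin cs b L = p := by rw [← hlen]; exact pvPrefix_drop_win cs p b hb
  exact pvWs_dup cs L (cs.length - L + 1) a b hab (by omega) (hwa.trans hwb.symm) hnd

/-! Dedup-of-window-enumeration order lemma. -/

theorem pvOfListWin_pairwise (cs : List Char) :
    ∀ (pairs : List (Nat × Nat)),
      pairs.Pairwise pvPosLt →
      (∀ pr ∈ pairs, 1 ≤ pr.2 ∧ pr.1 + pr.2 ≤ cs.length) →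
      (∀ pr ∈ pairs, ∀ i', i' < pr.1 → (i', pr.2) ∈ pairs) →
      (PySem.Set.ofList (pairs.map (fun pr => pvWin cs pr.1 pr.2))).Pairwise
          (fun x y => pvPosLt (pvPos cs x) (pvPos cs y))
        ∧ ∀ p ∈ PySem.Set.ofList (pairs.map (fun pr => pvWin cs pr.1 pr.2)),
            pvPos cs p ∈ pairs := by
  intro pairs
  induction pairs using List.reverseRecOn with
  | nil => intro _ _ _; simp [PySem.Set.ofList_nil]
  | append_singleton pairs pr ih =>
    intro hs hv hc
    have hs0 : pairs.Pairwise pvPosLt := (List.pairwise_append.mp hs).1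
    have hlast : ∀ q ∈ pairs, pvPosLt q pr := by
      intro q hq
      exact (List.pairwise_append.mp hs).2.2 q hq pr (by simp)
    have hv0 : ∀ q ∈ pairs, 1 ≤ q.2 ∧ q.1 + q.2 ≤ cs.length := fun q hq => hv q (by simp [hq])
    have hc0 : ∀ q ∈ pairs, ∀ i', i' < q.1 → (i', q.2) ∈ pairs := by
      intro q hq i' hi'
      have h := hc q (by simp [hq]) i' hi'
      rcases List.mem_append.mp h with h1 | h1
      · exact h1
      · exfalso
        simp only [List.mem_singleton] at h1
        have h2 : pvPosLt q pr := hlast q hq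
        rw [← h1] at h2
        simp only [pvPosLt] at h2
        omega
    obtain ⟨ihp, ihm⟩ := ih hs0 hv0 hc0
    rw [List.map_append, List.map_singleton, PySem.Set.ofList_append_singleton]
    by_cases hmem : pvWin cs pr.1 pr.2 ∈ PySem.Set.ofList (pairs.map (fun pr => pvWin cs pr.1 pr.2))
    · rw [PySem.Set.add_of_mem hmem]
      refine ⟨ihp, fun p hp => ?_⟩
      exact List.mem_append.mpr (Or.inl (ihm p hp))
    · rw [PySem.Set.add_of_not_mem hmem]
      have hvpr := hv pr (by simp)
      have hlen : (pvWin cs pr.1 pr.2).length = pr.2 := pvWin_length cs pr.1 pr.2 hvpr.2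
      have hpos : pvPos cs (pvWin cs pr.1 pr.2) = pr := by
        have hocc := pvWin_prefix_drop cs pr.1 pr.2
        obtain ⟨hle, hocc0⟩ := pvI0_le cs _ pr.1 hocc
        rcases Nat.lt_or_ge (pvI0 cs (pvWin cs pr.1 pr.2)) pr.1 with hlt | hge
        · exfalso
          have hin : (pvI0 cs (pvWin cs pr.1 pr.2), pr.2) ∈ pairs ++ [pr] :=
            hc pr (by simp) _ hlt
          have hin0 : (pvI0 cs (pvWin cs pr.1 pr.2), pr.2) ∈ pairs := by
            rcases List.mem_append.mp hin with h1 | h1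
            · exact h1
            · exfalso
              simp only [List.mem_singleton] at h1
              have : pvI0 cs (pvWin cs pr.1 pr.2) = pr.1 := by
                have hfst := congrArg Prod.fst h1
                simpa using hfst
              omega
          apply hmem
          rw [PySem.Set.mem_ofList]
          refine List.mem_map.mpr ⟨(pvI0 cs (pvWin cs pr.1 pr.2), pr.2), hin0, ?_⟩
          have hW := pvPrefix_drop_win cs (pvWin cs pr.1 pr.2) _ hocc0
          rw [hlen] at hW
          exact hW
        · have heq : pvI0 cs (pvWin cs pr.1 pr.2) = pr.1 := by omega
          simp [pvPos, heq, hlen]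
      constructor
      · rw [List.pairwise_append]
        refine ⟨ihp, by simp, ?_⟩
        intro x hx y hy
        simp only [List.mem_singleton] at hy
        subst hy
        rw [hpos]
        exact hlast _ (ihm x hx)
      · intro p hp
        rcases List.mem_append.mp hp with h1 | h1
        · exact List.mem_append.mpr (Or.inl (ihm p h1))
        · simp only [List.mem_singleton] at h1
          subst h1
          rw [hpos]
          simp

/-! pairsA is position-sorted. -/

theorem pvPairsA_sorted_aux (M : Nat) :
    ∀ m, ((List.range m).flatMap (fun i => (List.range (M - i)).map (fun k => (i, 2 + k)))).Pairwise pvPosLt := by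
  intro m
  induction m with
  | zero => simp
  | succ m ih =>
    rw [List.range_succ, List.flatMap_append, List.pairwise_append]
    refine ⟨ih, ?_, ?_⟩
    · simp only [List.flatMap_cons, List.flatMap_nil, List.append_nil]
      refine (List.pairwise_map).mpr ?_
      have h : (List.range (M - m)).Pairwise (· < ·) := List.pairwise_lt_range
      exact h.imp (by intro a b hab; dsimp only [pvPosLt]; omega)
    · intro a ha b hb
      simp only [List.mem_flatMap, List.mem_map, List.mem_range] at ha
      simp only [List.flatMap_cons, List.flatMap_nil, List.append_nil, List.mem_map,
        List.mem_range] at hb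
      obtain ⟨i, hi, k, _, rfl⟩ := ha
      obtain ⟨k', _, rfl⟩ := hb
      dsimp only [pvPosLt]
      omega

theorem pvPairsA_sorted (cs : List Char) : (pvPairsA cs).Pairwise pvPosLt :=
  pvPairsA_sorted_aux (cs.length - 1) (cs.length - 1)

theorem pvKeyList_tie_pairwise (cs : List Char) :
    (pvKeyList cs).Pairwise (fun m x => pvTie cs m x → pvI0 cs m < pvI0 cs x) := by
  have hv : ∀ pr ∈ pvPairsA cs, 1 ≤ pr.2 ∧ pr.1 + pr.2 ≤ cs.length := by
    rintro ⟨i, L⟩ hpr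
    obtain ⟨h2, hle⟩ := (pvMemA cs i L).mp hpr
    exact ⟨by omega, hle⟩
  have hcm : ∀ pr ∈ pvPairsA cs, ∀ i', i' < pr.1 → (i', pr.2) ∈ pvPairsA cs := by
    rintro ⟨i, L⟩ hpr i' hi'
    obtain ⟨h2, hle⟩ := (pvMemA cs i L).mp hpr
    exact (pvMemA cs i' L).mpr ⟨h2, by omega⟩
  obtain ⟨hpw, _⟩ := pvOfListWin_pairwise cs (pvPairsA cs) (pvPairsA_sorted cs) hv hcm
  have hsub := List.Pairwise.sublist (List.filter_sublist (l := PySem.Set.ofList ((pvPairsA cs).map (fun pr => pvWin cs pr.1 pr.2))) (p := pvC cs)) hpw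
  refine hsub.imp ?_
  intro m x hmx htie
  simp only [pvPosLt, pvPos] at hmx
  rcases hmx with h | h
  · exact h
  · exfalso
    have := htie.2
    omega

theorem pvLBL_tie_pairwise (cs : List Char) (L : Nat) (h1 : 1 ≤ L) (hn : L ≤ cs.length) :
    (pvLBL cs L).Pairwise (fun m x => pvTie cs m x → pvI0 cs m < pvI0 cs x) := by
  have hmapeq : pvWs cs L (cs.length - L + 1) =
      ((List.range (cs.length - L + 1)).map (fun i => (i, L))).map (fun pr => pvWin cs pr.1 pr.2) := by
    simp [pvWs, List.map_map, Function.comp]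
  have hs : ((List.range (cs.length - L + 1)).map (fun i => (i, L))).Pairwise pvPosLt := by
    refine (List.pairwise_map).mpr ?_
    have h : (List.range (cs.length - L + 1)).Pairwise (· < ·) := List.pairwise_lt_range
    exact h.imp (by intro a b hab; dsimp only [pvPosLt]; omega)
  have hv : ∀ pr ∈ (List.range (cs.length - L + 1)).map (fun i => (i, L)),
      1 ≤ pr.2 ∧ pr.1 + pr.2 ≤ cs.length := by
    rintro pr hpr
    simp only [List.mem_map, List.mem_range] at hpr
    obtain ⟨i, hi, rfl⟩ := hpr
    exact ⟨h1, by omega⟩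
  have hcm : ∀ pr ∈ (List.range (cs.length - L + 1)).map (fun i => (i, L)),
      ∀ i', i' < pr.1 → (i', pr.2) ∈ (List.range (cs.length - L + 1)).map (fun i => (i, L)) := by
    rintro pr hpr i' hi'
    simp only [List.mem_map, List.mem_range] at hpr ⊢
    obtain ⟨i, hi, rfl⟩ := hpr
    exact ⟨i', by omega, rfl⟩
  obtain ⟨hpw, _⟩ := pvOfListWin_pairwise cs _ hs hv hcm
  rw [← hmapeq] at hpw
  have hsub := List.Pairwise.sublist
    (List.filter_sublist (l := PySem.Set.ofList (pvWs cs L (cs.length - L + 1))) (p := pvC cs)) hpw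
  refine hsub.imp ?_
  intro m x hmx htie
  simp only [pvPosLt, pvPos] at hmx
  rcases hmx with h | h
  · exact h
  · exfalso
    have := htie.2
    omega

/-! A dict structure. -/

theorem pvFoldl_if_filter {α β : Type} (c : α → Prop) [DecidablePred c] (f : β → α → β) :
    ∀ (l : List α) (b : β),
      l.foldl (fun d x => if c x then f d x else d) b = (l.filter (fun x => decide (c x))).foldl f b := by
  intro l
  induction l with
  | nil => intro b; simp
  | cons x l ih =>
    intro b
    by_cases hx : c x <;> simp [hx, List.filter_cons, ih]

theorem pvGetD_foldl_insert (g : List Char → Int) :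
    ∀ (l : List (List Char)) (d : PySem.Dict (List Char) Int) (p : List Char),
      (l.foldl (fun d x => d.insert x (g x)) d).getD p 0 =
        if p ∈ l then g p else d.getD p 0 := by
  intro l
  induction l with
  | nil => intro d p; simp
  | cons x l ih =>
    intro d p
    simp only [List.foldl_cons, ih]
    by_cases hpl : p ∈ l
    · simp [hpl]
    · by_cases hpx : p = x
      · subst hpx
        simp [hpl, PySem.Dict.getD_insert_self]
      · simp [hpl, hpx, PySem.Dict.getD_insert_of_ne _ _ _ hpx]

theorem pvOfList_filter (c : List Char → Bool) :
    ∀ (l : List (List Char)),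
      PySem.Set.ofList (l.filter c) = (PySem.Set.ofList l).filter c := by
  intro l
  induction l using List.reverseRecOn with
  | nil => simp [PySem.Set.ofList_nil]
  | append_singleton l x ih =>
    rw [List.filter_append, PySem.Set.ofList_append_singleton]
    by_cases hmem : x ∈ PySem.Set.ofList l
    · rw [PySem.Set.add_of_mem hmem]
      by_cases hcx : c x
      · have hxl : x ∈ l := (PySem.Set.mem_ofList _ _).mp hmem
        have hxf : x ∈ l.filter c := List.mem_filter.mpr ⟨hxl, hcx⟩
        have hmem2 : x ∈ PySem.Set.ofList (l.filter c) := (PySem.Set.mem_ofList _ _).mpr hxf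
        rw [show (List.filter c [x]) = [x] by simp [hcx], PySem.Set.ofList_append_singleton,
          PySem.Set.add_of_mem hmem2, ih]
      · rw [show (List.filter c [x]) = [] by simp [hcx], List.append_nil, ih]
    · rw [PySem.Set.add_of_not_mem hmem]
      have hxl : x ∉ l := fun h => hmem ((PySem.Set.mem_ofList _ _).mpr h)
      by_cases hcx : c x
      · rw [show (List.filter c [x]) = [x] by simp [hcx], PySem.Set.ofList_append_singleton]
        have hnm : x ∉ PySem.Set.ofList (l.filter c) := by
          rw [PySem.Set.mem_ofList]
          intro h
          exact hxl (List.mem_filter.mp h).1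
        rw [PySem.Set.add_of_not_mem hnm, ih, List.filter_append]
        simp [hcx]
      · rw [show (List.filter c [x]) = [] by simp [hcx], List.append_nil, ih, List.filter_append]
        simp [hcx]

/-! Selection lemmas. -/

theorem pvHead?_insertBy (before : List Char → List Char → Bool) (x : List Char)
    (ys : List (List Char)) :
    (PySem.List.insertBy before x ys).head? =
      some (match ys.head? with
            | none => x
            | some y => if before x y then x else y) := by
  cases ys with
  | nil => simp [PySem.List.insertBy]
  | cons y ys =>
    rw [PySem.List.insertBy.eq_2]
    by_cases h : before x y <;> simp [h]

theorem pvHead?_foldl_insertBy (before : List Char → List Char → Bool) :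
    ∀ (l : List (List Char)) (acc : List (List Char)),
      (l.foldl (fun acc x => PySem.List.insertBy before x acc) acc).head? =
        l.foldl (pvSel before) acc.head? := by
  intro l
  induction l with
  | nil => intro acc; simp
  | cons x l ih =>
    intro acc
    simp only [List.foldl_cons]
    rw [ih]
    congr 1
    rw [pvHead?_insertBy]
    cases acc with
    | nil => simp [pvSel]
    | cons y ys =>
      show some (if before x y = true then x else y) = pvSel before (some y) x
      simp only [pvSel]
      by_cases h : before x y <;> simp [h]

theorem pvFoldl_sel_congr (P Q : List Char → List Char → Bool) (Pr : List Char → Prop)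
    (hPQ : ∀ x m, Pr x → Pr m → P x m = Q x m) :
    ∀ (l : List (List Char)) (o : Option (List Char)),
      (∀ x ∈ l, Pr x) → (∀ m, o = some m → Pr m) →
      l.foldl (pvSel P) o = l.foldl (pvSel Q) o := by
  intro l
  induction l with
  | nil => intro o _ _; simp
  | cons x l ih =>
    intro o hl ho
    have hx : Pr x := hl x (by simp)
    have hstep : pvSel P o x = pvSel Q o x := by
      cases o with
      | none => simp [pvSel]
      | some m => simp only [pvSel, hPQ x m hx (ho m rfl)]
    rw [List.foldl_cons, List.foldl_cons, hstep]
    apply ih _ (fun y hy => hl y (by simp [hy]))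
    intro m hm
    cases o with
    | none =>
      simp only [pvSel] at hm
      rw [Option.some.injEq] at hm
      rw [← hm]
      exact hx
    | some m0 =>
      simp only [pvSel] at hm
      by_cases hq : Q x m0
      · rw [if_pos hq, Option.some.injEq] at hm
        rw [← hm]; exact hx
      · rw [if_neg hq, Option.some.injEq] at hm
        rw [← hm]; exact ho m0 rfl

theorem pvPick1 (cs : List Char) :
    ∀ (l : List (List Char)) (o : Option (List Char)),
      l.Pairwise (fun m x => pvTie cs m x → pvI0 cs m < pvI0 cs x) →
      (∀ m, o = some m → ∀ x ∈ l, pvTie cs m x → pvI0 cs m < pvI0 cs x) →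
      l.foldl (pvSel (pvBetterB cs)) o = l.foldl (pvSel (pvBetter3B cs)) o := by
  intro l
  induction l with
  | nil => intro o _ _; simp
  | cons x l ih =>
    intro o hpw ho
    obtain ⟨hhead, htail⟩ := List.pairwise_cons.mp hpw
    have hstep : pvSel (pvBetterB cs) o x = pvSel (pvBetter3B cs) o x := by
      cases o with
      | none => simp [pvSel]
      | some m =>
        have hB : pvBetterB cs x m = pvBetter3B cs x m := by
          by_cases htie : pvTie cs m x
          · have hI := ho m rfl x (by simp) htie
            simp only [pvBetter3B, pvTie] at *
            have : ¬ (pvI0 cs x < pvI0 cs m) := by omega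
            simp [this]
          · simp only [pvBetter3B, pvTie] at *
            have hne : ¬ (pvCnt cs x = pvCnt cs m ∧ x.length = m.length) := by
              intro hcc
              exact htie ⟨hcc.1.symm, hcc.2.symm⟩
            rcases Decidable.not_and_iff_not_or_not.mp hne with h1 | h1 <;> simp [h1]
        simp only [pvSel, hB]
    rw [List.foldl_cons, List.foldl_cons, hstep]
    apply ih _ htail
    intro m hm
    cases o with
    | none =>
      simp only [pvSel] at hm
      rw [Option.some.injEq] at hm
      subst hm
      exact hhead
    | some m0 =>
      simp only [pvSel] at hm
      by_cases hq : pvBetter3B cs x m0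
      · rw [if_pos hq, Option.some.injEq] at hm
        subst hm
        exact hhead
      · rw [if_neg hq, Option.some.injEq] at hm
        subst hm
        exact fun y hy => ho _ rfl y (by simp [hy])

theorem pvPick_some (P : List Char → List Char → Bool) :
    ∀ (l : List (List Char)) (m : List Char), ∃ r, l.foldl (pvSel P) (some m) = some r := by
  intro l
  induction l with
  | nil => intro m; exact ⟨m, rfl⟩
  | cons x l ih =>
    intro m
    rw [List.foldl_cons]
    show ∃ r, List.foldl (pvSel P) (pvSel P (some m) x) l = some r
    simp only [pvSel]
    by_cases h : P x m
    · rw [if_pos h]; exact ih x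
    · rw [if_neg h]; exact ih m

theorem pvPick_none_iff (P : List Char → List Char → Bool) :
    ∀ (l : List (List Char)), l.foldl (pvSel P) none = none ↔ l = [] := by
  intro l
  cases l with
  | nil => simp
  | cons x l =>
    rw [List.foldl_cons]
    show List.foldl (pvSel P) (some x) l = none ↔ _
    obtain ⟨r, hr⟩ := pvPick_some P l x
    simp [hr]

theorem pvB3_trans (cs : List Char) (x y z : List Char)
    (h1 : pvBetter3 cs x y) (h2 : pvBetter3 cs y z) : pvBetter3 cs x z := by
  simp only [pvBetter3, pvBetter, pvTie] at *
  omega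

theorem pvB3_asymm (cs : List Char) (x y : List Char)
    (h1 : pvBetter3 cs x y) (h2 : pvBetter3 cs y x) : False := by
  simp only [pvBetter3, pvBetter, pvTie] at *
  omega

theorem pvB3_tri (cs : List Char) (x y : List Char) (hx : pvCandB cs x) (hy : pvCandB cs y)
    (hne : x ≠ y) : pvBetter3 cs x y ∨ pvBetter3 cs y x := by
  have hinj : pvI0 cs x = pvI0 cs y → x.length = y.length → False := by
    intro h1 h2
    apply hne
    rw [← hx.2.2.2, ← hy.2.2.2, h1, h2]
  simp only [pvBetter3, pvBetter, pvTie]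
  by_cases hI : pvI0 cs x = pvI0 cs y
  · by_cases hL : x.length = y.length
    · exact (hinj hI hL).elim
    · omega
  · omega

theorem pvB3B_iff (cs x m : List Char) : pvBetter3B cs x m = true ↔ pvBetter3 cs x m := by
  simp only [pvBetter3B, pvBetterB, pvBetter3, pvBetter, pvTie, Bool.or_eq_true,
    Bool.and_eq_true, decide_eq_true_eq]

theorem pvBB_iff (cs x m : List Char) : pvBetterB cs x m = true ↔ pvBetter cs x m := by
  simp only [pvBetterB, pvBetter, Bool.or_eq_true, Bool.and_eq_true, decide_eq_true_eq]

theorem pvPick3_spec (cs : List Char) :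
    ∀ (l : List (List Char)) (m r : List Char),
      (∀ x ∈ l, pvCandB cs x) → pvCandB cs m →
      l.foldl (pvSel (pvBetter3B cs)) (some m) = some r →
      (r = m ∨ r ∈ l) ∧ pvCandB cs r ∧ ∀ x, (x = m ∨ x ∈ l) → x ≠ r → pvBetter3 cs r x := by
  intro l
  induction l with
  | nil =>
    intro m r _ hm h
    simp only [List.foldl_nil, Option.some.injEq] at h
    subst h
    refine ⟨Or.inl rfl, hm, ?_⟩
    rintro x (rfl | hx) hne
    · exact absurd rfl hne
    · simp at hx
  | cons x l ih =>
    intro m r hl hm h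
    rw [List.foldl_cons] at h
    have hx : pvCandB cs x := hl x (by simp)
    have hl' : ∀ y ∈ l, pvCandB cs y := fun y hy => hl y (by simp [hy])
    by_cases hb : pvBetter3B cs x m
    · rw [show pvSel (pvBetter3B cs) (some m) x = some x by simp [pvSel, hb]] at h
      obtain ⟨hr1, hrc, hr2⟩ := ih x r hl' hx h
      have hbxm : pvBetter3 cs x m := (pvB3B_iff cs x m).mp hb
      have hrxm : pvBetter3 cs r m := by
        rcases hr1 with rfl | _
        · exact hbxm
        · by_cases hrx : r = x
          · rw [hrx]; exact hbxm
          · exact pvB3_trans cs r x m (hr2 x (Or.inl rfl) (fun h => hrx h.symm)) hbxm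
      refine ⟨?_, hrc, ?_⟩
      · rcases hr1 with rfl | hr1
        · exact Or.inr (by simp)
        · exact Or.inr (by simp [hr1])
      · rintro y (rfl | hy) hne
        · exact hrxm
        · rcases (List.mem_cons.mp hy) with rfl | hy'
          · by_cases hry : r = y
            · exact absurd hry.symm hne
            · exact hr2 y (Or.inl rfl) hne
          · exact hr2 y (Or.inr hy') hne
    · rw [show pvSel (pvBetter3B cs) (some m) x = some m by simp [pvSel, hb]] at h
      obtain ⟨hr1, hrc, hr2⟩ := ih m r hl' hm h
      have hnbxm : ¬ pvBetter3 cs x m := fun hh => hb ((pvB3B_iff cs x m).mpr hh)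
      refine ⟨?_, hrc, ?_⟩
      · rcases hr1 with rfl | hr1
        · exact Or.inl rfl
        · exact Or.inr (by simp [hr1])
      · rintro y (rfl | hy) hne
        · exact hr2 y (Or.inl rfl) hne
        · rcases (List.mem_cons.mp hy) with rfl | hy'
          · -- y = x: m beats x by trichotomy, and r = m or r beats m
            by_cases hym : y = m
            · subst hym; exact hr2 y (Or.inl rfl) hne
            · have hmy : pvBetter3 cs m y := by
                rcases pvB3_tri cs y m hx hm hym with h1 | h1
                · exact absurd h1 hnbxm
                · exact h1
              rcases hr1 with rfl | _
              · exact hmy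
              · by_cases hrm : r = m
                · rw [hrm]; exact hmy
                · exact pvB3_trans cs r m y (hr2 m (Or.inl rfl) (fun h => hrm h.symm)) hmy
          · exact hr2 y (Or.inr hy') hne

theorem pvPick_eq_of_mem (cs : List Char) (l1 l2 : List (List Char))
    (h1 : ∀ x ∈ l1, pvCandB cs x) (h2 : ∀ x ∈ l2, pvCandB cs x)
    (hm : ∀ p, p ∈ l1 ↔ p ∈ l2) :
    l1.foldl (pvSel (pvBetter3B cs)) none = l2.foldl (pvSel (pvBetter3B cs)) none := by
  cases l1 with
  | nil =>
    have : l2 = [] := by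
      cases l2 with
      | nil => rfl
      | cons y l2 => exact absurd ((hm y).mpr (by simp)) (by simp)
    rw [this]
  | cons x1 t1 =>
    cases l2 with
    | nil => exact absurd ((hm x1).mp (by simp)) (by simp)
    | cons x2 t2 =>
      rw [List.foldl_cons, List.foldl_cons]
      rw [show pvSel (pvBetter3B cs) none x1 = some x1 from rfl,
        show pvSel (pvBetter3B cs) none x2 = some x2 from rfl]
      obtain ⟨r1, hr1⟩ := pvPick_some (pvBetter3B cs) t1 x1
      obtain ⟨r2, hr2⟩ := pvPick_some (pvBetter3B cs) t2 x2
      rw [hr1, hr2]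
      obtain ⟨hm1, hc1, hb1⟩ := pvPick3_spec cs t1 x1 r1 (fun y hy => h1 y (by simp [hy]))
        (h1 x1 (by simp)) hr1
      obtain ⟨hm2, hc2, hb2⟩ := pvPick3_spec cs t2 x2 r2 (fun y hy => h2 y (by simp [hy]))
        (h2 x2 (by simp)) hr2
      have hr1mem : r1 ∈ x2 :: t2 := by
        apply (hm r1).mp
        rcases hm1 with rfl | h
        · simp
        · simp [h]
      have hr2mem : r2 ∈ x1 :: t1 := by
        apply (hm r2).mpr
        rcases hm2 with rfl | h
        · simp
        · simp [h]
      by_cases hrr : r1 = r2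
      · rw [hrr]
      · exfalso
        have hb12 : pvBetter3 cs r1 r2 := by
          rcases List.mem_cons.mp hr2mem with h | h
        -- r2 = x1 or r2 ∈ t1
          · exact hb1 r2 (Or.inl h) (fun he => hrr he.symm)
          · exact hb1 r2 (Or.inr h) (fun he => hrr he.symm)
        have hb21 : pvBetter3 cs r2 r1 := by
          rcases List.mem_cons.mp hr1mem with h | h
          · exact hb2 r1 (Or.inl h) hrr
          · exact hb2 r1 (Or.inr h) hrr
        exact pvB3_asymm cs r1 r2 hb12 hb21

/-! A-side loop characterisation. -/

theorem pvWin_ext (cs : List Char) (i k : Nat) (h : i + k < cs.length) :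
    pvWin cs i k ++ [cs.getD (i + k) ' '] = pvWin cs i (k + 1) := by
  simp only [pvWin]
  rw [List.take_succ]
  congr 1
  rw [List.getElem?_drop]
  rw [List.getElem?_eq_getElem h]
  simp [List.getD_eq_getElem?_getD, List.getElem?_eq_getElem h]

theorem pvWin_one (cs : List Char) (i : Nat) (hi : i < cs.length) :
    pvWin cs i 1 = [cs.getD i ' '] := by
  have h := pvWin_ext cs i 0 (by omega)
  simpa [pvWin] using h.symm

theorem pvAIns_append (cs : List Char) (d : PySem.Dict (List Char) Int)
    (l1 l2 : List (List Char)) : pvAIns cs d (l1 ++ l2) = pvAIns cs (pvAIns cs d l1) l2 := by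
  simp [pvAIns, List.foldl_append]

theorem pvA_inner_aux (cs : List Char) (i : Nat) (hi : i < cs.length)
    (d : PySem.Dict (List Char) Int) :
    ∀ m, i + 1 + m ≤ cs.length →
      ((List.range m).foldl
          (fun (st : List Char × PySem.Dict (List Char) Int) (k : Nat) =>
            (st.1 ++ [PySem.List.pyGetD cs ((i : Int) + 1 + (k : Int)) ' '],
              if 1 < ((PySem.Chars.count cs (st.1 ++ [PySem.List.pyGetD cs ((i : Int) + 1 + (k : Int)) ' ']) : Int))
              then st.2.insert (st.1 ++ [PySem.List.pyGetD cs ((i : Int) + 1 + (k : Int)) ' '])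
                ((PySem.Chars.count cs (st.1 ++ [PySem.List.pyGetD cs ((i : Int) + 1 + (k : Int)) ' ']) : Int))
              else st.2))
          ([PySem.List.pyGetD cs (i : Int) ' '], d)) =
        (pvWin cs i (1 + m), pvAIns cs d ((List.range m).map (fun k => pvWin cs i (2 + k)))) := by
  intro m
  induction m with
  | zero =>
    intro _
    simp only [List.range_zero, List.foldl_nil, List.map_nil]
    rw [PySem.List.pyGetD_natCast, pvWin_one cs i hi]
    rfl
  | succ m ih =>
    intro hm
    rw [List.range_succ, List.foldl_append, List.map_append, ih (by omega)]
    simp only [List.foldl_cons, List.foldl_nil]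
    have hcast : (i : Int) + 1 + (m : Int) = ((i + 1 + m : Nat) : Int) := by push_cast; ring
    rw [hcast, PySem.List.pyGetD_natCast]
    have hidx : i + (1 + m) = i + 1 + m := by omega
    have hext : pvWin cs i (1 + m) ++ [cs.getD (i + 1 + m) ' '] = pvWin cs i (2 + m) := by
      have h := pvWin_ext cs i (1 + m) (by omega)
      rw [hidx] at h
      have : 1 + m + 1 = 2 + m := by omega
      rw [this] at h
      exact h
    simp only [List.getD_eq_getElem?_getD] at hext ⊢
    rw [hext]
    have h21 : 1 + (m + 1) = 2 + m := by omega
    rw [h21, pvAIns_append]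
    rfl

theorem pvA_inner (cs : List Char) (i : Nat) (hi : i < cs.length)
    (d : PySem.Dict (List Char) Int) :
    ((PySem.List.pyRange ((i : Int) + 1) (cs.length : Int)).foldl
        (fun (st : List Char × PySem.Dict (List Char) Int) j =>
          (st.1 ++ [PySem.List.pyGetD cs j ' '],
            if 1 < ((PySem.Chars.count cs (st.1 ++ [PySem.List.pyGetD cs j ' ']) : Int))
            then st.2.insert (st.1 ++ [PySem.List.pyGetD cs j ' '])
              ((PySem.Chars.count cs (st.1 ++ [PySem.List.pyGetD cs j ' ']) : Int))
            else st.2))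
        ([PySem.List.pyGetD cs (i : Int) ' '], d)).2 =
      pvAIns cs d ((List.range (cs.length - i - 1)).map (fun k => pvWin cs i (2 + k))) := by
  rw [PySem.List.pyRange_one]
  have htn : ((cs.length : Int) - ((i : Int) + 1)).toNat = cs.length - i - 1 := by omega
  rw [htn, List.foldl_map]
  rw [pvA_inner_aux cs i hi d (cs.length - i - 1) (by omega)]

theorem pvA_hm_aux (cs : List Char) :
    ∀ m, m ≤ cs.length - 1 →
      ((List.range m).foldl
          (fun (d : PySem.Dict (List Char) Int) (i : Nat) =>
            ((PySem.List.pyRange ((i : Int) + 1) (cs.length : Int)).foldl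
                (fun (st : List Char × PySem.Dict (List Char) Int) j =>
                  (st.1 ++ [PySem.List.pyGetD cs j ' '],
                    if 1 < ((PySem.Chars.count cs (st.1 ++ [PySem.List.pyGetD cs j ' ']) : Int))
                    then st.2.insert (st.1 ++ [PySem.List.pyGetD cs j ' '])
                      ((PySem.Chars.count cs (st.1 ++ [PySem.List.pyGetD cs j ' ']) : Int))
                    else st.2))
                ([PySem.List.pyGetD cs (i : Int) ' '], d)).2)
          PySem.Dict.empty) =
        pvAIns cs PySem.Dict.empty
          (((List.range m).flatMap
              (fun i => (List.range (cs.length - 1 - i)).map (fun k => (i, 2 + k)))).map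
            (fun pr => pvWin cs pr.1 pr.2)) := by
  intro m
  induction m with
  | zero => simp [pvAIns]
  | succ m ih =>
    intro hm
    rw [List.range_succ, List.foldl_append, ih (by omega)]
    simp only [List.foldl_cons, List.foldl_nil]
    rw [pvA_inner cs m (by omega) _]
    rw [List.flatMap_append, List.map_append, pvAIns_append]
    congr 1
    simp only [List.flatMap_cons, List.flatMap_nil, List.append_nil, List.map_map]
    have hsub : cs.length - m - 1 = cs.length - 1 - m := by omega
    rw [hsub]
    rfl

theorem pvA_hm (cs : List Char) :
    ((PySem.List.pyRange 0 ((cs.length : Int) - 1)).foldl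
        (fun (d : PySem.Dict (List Char) Int) i =>
          ((PySem.List.pyRange (i + 1) (cs.length : Int)).foldl
              (fun (st : List Char × PySem.Dict (List Char) Int) j =>
                (st.1 ++ [PySem.List.pyGetD cs j ' '],
                  if 1 < ((PySem.Chars.count cs (st.1 ++ [PySem.List.pyGetD cs j ' ']) : Int))
                  then st.2.insert (st.1 ++ [PySem.List.pyGetD cs j ' '])
                    ((PySem.Chars.count cs (st.1 ++ [PySem.List.pyGetD cs j ' ']) : Int))
                  else st.2))
              ([PySem.List.pyGetD cs i ' '], d)).2)
        PySem.Dict.empty) =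
      pvAIns cs PySem.Dict.empty ((pvPairsA cs).map (fun pr => pvWin cs pr.1 pr.2)) := by
  rw [PySem.List.pyRange_one]
  have htn : ((cs.length : Int) - 1 - 0).toNat = cs.length - 1 := by omega
  rw [htn, List.foldl_map]
  have hz : ∀ (k : Nat), (0 : Int) + (k : Int) = (k : Int) := by intro k; ring
  simp only [hz]
  exact pvA_hm_aux cs (cs.length - 1) (by omega)

theorem pvAIns_eq_filter_fold (cs : List Char) (d : PySem.Dict (List Char) Int)
    (l : List (List Char)) :
    pvAIns cs d l = (l.filter (pvC cs)).foldl (fun d p => d.insert p ((pvCnt cs p : Int))) d := by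
  have hff := pvFoldl_if_filter (fun p : List Char => 1 < ((PySem.Chars.count cs p : Int)))
    (fun (d : PySem.Dict (List Char) Int) p => d.insert p ((PySem.Chars.count cs p : Int))) l d
  have hc : (fun p : List Char => decide (1 < ((PySem.Chars.count cs p : Int)))) = pvC cs := by
    funext p
    simp [pvC, pvCnt]
  rw [pvAIns, hff, hc]
  rfl

theorem pvA_keys (cs : List Char) (l : List (List Char)) :
    (pvAIns cs PySem.Dict.empty l).keys = PySem.Set.ofList (l.filter (pvC cs)) := by
  rw [pvAIns_eq_filter_fold]
  have h := PySem.Dict.keys_foldl_insert (ν := Int) (l.filter (pvC cs))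
    (fun _ p => ((pvCnt cs p : Int))) PySem.Dict.empty
  rw [h, PySem.Dict.keys_empty, PySem.Set.update_nil_left]

theorem pvA_getD (cs : List Char) (l : List (List Char)) (p : List Char) :
    (pvAIns cs PySem.Dict.empty l).getD p 0 =
      if p ∈ l.filter (pvC cs) then (pvCnt cs p : Int) else 0 := by
  rw [pvAIns_eq_filter_fold]
  rw [pvGetD_foldl_insert (fun p => ((pvCnt cs p : Int))) (l.filter (pvC cs)) PySem.Dict.empty p]
  simp

/-! B-side loop characterisation. -/

theorem pvFoldl_congr_mem2 {alpha beta : Type} (l : List alpha) (f g : beta → alpha → beta)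
    (h : ∀ b x, x ∈ l → f b x = g b x) : ∀ b, l.foldl f b = l.foldl g b := by
  induction l with
  | nil => intro b; rfl
  | cons x t ih =>
    intro b
    rw [List.foldl_cons, List.foldl_cons, h b x (by simp)]
    exact ih (fun b y hy => h b y (by simp [hy])) _

theorem pvAltLen_aux (cs : List Char) (L : Nat) (b : Option (Int × Int × List Char)) :
    ∀ m,
      ((List.range m).foldl
          (fun (st : Bool × PySem.Set (List Char) × Option (Int × Int × List Char)) (i : Nat) =>
            if st.2.1.contains (PySem.List.slice cs (some (i : Int)) (some ((i : Int) + (L : Int)))) then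
              (true, st.2.1, st.2.2)
            else
              (st.1, st.2.1.add (PySem.List.slice cs (some (i : Int)) (some ((i : Int) + (L : Int)))),
                if 1 < ((PySem.Chars.count cs (PySem.List.slice cs (some (i : Int)) (some ((i : Int) + (L : Int)))) : Int))
                then pvBestUpd ((PySem.Chars.count cs (PySem.List.slice cs (some (i : Int)) (some ((i : Int) + (L : Int)))) : Int)) (L : Int)
                  (PySem.List.slice cs (some (i : Int)) (some ((i : Int) + (L : Int)))) st.2.2
                else st.2.2))
          (false, PySem.Set.empty, b)) =
        (!decide ((pvWs cs L m).Nodup),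
          PySem.Set.ofList (pvWs cs L m),
          ((PySem.Set.ofList (pvWs cs L m)).filter (pvC cs)).foldl
            (fun acc p => pvBestUpd ((pvCnt cs p : Int)) ((L : Int)) p acc) b) := by
  intro m
  induction m with
  | zero =>
    simp [pvWs, PySem.Set.ofList_nil, PySem.Set.empty_eq]
  | succ m ih =>
    rw [List.range_succ, List.foldl_append, ih]
    simp only [List.foldl_cons, List.foldl_nil]
    have hslice : PySem.List.slice cs (some (m : Int)) (some ((m : Int) + (L : Int))) = pvWin cs m L := by
      simpa [pvWin] using PySem.List.slice_natCast_add cs m L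
    have hws : pvWs cs L (m + 1) = pvWs cs L m ++ [pvWin cs m L] := by
      simp [pvWs, List.range_succ]
    rw [hslice, hws]
    by_cases hmem : pvWin cs m L ∈ pvWs cs L m
    · have hcont : (PySem.Set.ofList (pvWs cs L m)).contains (pvWin cs m L) = true :=
        (PySem.Set.contains_iff _ _).mpr ((PySem.Set.mem_ofList _ _).mpr hmem)
      rw [if_pos hcont]
      have hnd : ¬ (pvWs cs L m ++ [pvWin cs m L]).Nodup := by
        intro h
        exact (List.disjoint_of_nodup_append h) hmem (by simp)
      have hofl : PySem.Set.ofList (pvWs cs L m ++ [pvWin cs m L]) = PySem.Set.ofList (pvWs cs L m) := by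
        rw [PySem.Set.ofList_append_singleton,
          PySem.Set.add_of_mem ((PySem.Set.mem_ofList _ _).mpr hmem)]
      rw [hofl]
      simp [hnd]
    · have hcont : (PySem.Set.ofList (pvWs cs L m)).contains (pvWin cs m L) = false := by
        rw [← Bool.not_eq_true]
        intro h
        exact hmem ((PySem.Set.mem_ofList _ _).mp ((PySem.Set.contains_iff _ _).mp h))
      rw [if_neg (by rw [hcont]; simp)]
      have hndiff : (pvWs cs L m ++ [pvWin cs m L]).Nodup ↔ (pvWs cs L m).Nodup := by
        rw [List.nodup_append]
        constructor
        · rintro ⟨h1, _, _⟩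
          exact h1
        · intro h1
          refine ⟨h1, List.nodup_singleton _, ?_⟩
          intro a ha b hb
          rw [List.mem_singleton] at hb
          subst hb
          intro he
          subst he
          exact hmem ha
      have hofl : PySem.Set.ofList (pvWs cs L m ++ [pvWin cs m L]) =
          PySem.Set.ofList (pvWs cs L m) ++ [pvWin cs m L] := by
        rw [PySem.Set.ofList_append_singleton]
        exact PySem.Set.add_of_not_mem (fun h => hmem ((PySem.Set.mem_ofList _ _).mp h))
      refine Prod.ext ?_ (Prod.ext ?_ ?_)
      · simp only []
        rw [Bool.eq_iff_iff]
        simp [hndiff]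
      · rw [hofl]
        exact PySem.Set.add_of_not_mem (fun h => hmem ((PySem.Set.mem_ofList _ _).mp h))
      · simp only [hofl, List.filter_append]
        by_cases hcp : pvC cs (pvWin cs m L)
        · rw [show List.filter (pvC cs) [pvWin cs m L] = [pvWin cs m L] by simp [hcp]]
          rw [List.foldl_append]
          simp only [List.foldl_cons, List.foldl_nil]
          have h1 : (1 : Int) < ((PySem.Chars.count cs (pvWin cs m L) : Int)) := by
            have := (of_decide_eq_true hcp : 1 < pvCnt cs (pvWin cs m L))
            simp only [pvCnt] at this
            exact_mod_cast this
          rw [if_pos h1]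
          rfl
        · rw [show List.filter (pvC cs) [pvWin cs m L] = [] by simp [hcp]]
          have h1 : ¬ ((1 : Int) < ((PySem.Chars.count cs (pvWin cs m L) : Int))) := by
            intro hlt
            apply hcp
            simp only [pvC, pvCnt]
            have : (1 : Nat) < PySem.Chars.count cs (pvWin cs m L) := by exact_mod_cast hlt
            simpa using this
          rw [if_neg h1]
          simp

theorem pvAltLen_spec (cs : List Char) (L : Nat) (hn : L ≤ cs.length)
    (b : Option (Int × Int × List Char)) :
    pvAltLen cs L b =
      (!decide ((pvWs cs L (cs.length - L + 1)).Nodup),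
        PySem.Set.ofList (pvWs cs L (cs.length - L + 1)),
        (pvLBL cs L).foldl (pvStepT cs) b) := by
  have haux := pvAltLen_aux cs L b (cs.length - L + 1)
  have hlen : ∀ p ∈ pvLBL cs L, p.length = L := by
    intro p hp
    simp only [pvLBL, List.mem_filter, PySem.Set.mem_ofList, pvWs, List.mem_map,
      List.mem_range] at hp
    obtain ⟨⟨i, hi, rfl⟩, _⟩ := hp
    exact pvWin_length cs i L (by omega)
  have hcong : (pvLBL cs L).foldl (fun acc p => pvBestUpd ((pvCnt cs p : Int)) ((L : Int)) p acc) b =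
      (pvLBL cs L).foldl (pvStepT cs) b := by
    apply pvFoldl_congr_mem2
    intro acc p hp
    rw [pvStepT, hlen p hp]
  have hdef : pvAltLen cs L b =
      ((List.range (cs.length - L + 1)).foldl
          (fun (st : Bool × PySem.Set (List Char) × Option (Int × Int × List Char)) (i : Nat) =>
            if st.2.1.contains (PySem.List.slice cs (some (i : Int)) (some ((i : Int) + (L : Int)))) then
              (true, st.2.1, st.2.2)
            else
              (st.1, st.2.1.add (PySem.List.slice cs (some (i : Int)) (some ((i : Int) + (L : Int)))),
                if 1 < ((PySem.Chars.count cs (PySem.List.slice cs (some (i : Int)) (some ((i : Int) + (L : Int)))) : Int))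
                then pvBestUpd ((PySem.Chars.count cs (PySem.List.slice cs (some (i : Int)) (some ((i : Int) + (L : Int)))) : Int)) (L : Int)
                  (PySem.List.slice cs (some (i : Int)) (some ((i : Int) + (L : Int)))) st.2.2
                else st.2.2))
          (false, PySem.Set.empty, b)) := rfl
  rw [hdef, haux]
  rw [← hcong]
  rfl

theorem pvLens_cons (cs : List Char) (L : Nat) (h : L ≤ cs.length) :
    pvLens cs L = L :: pvLens cs (L + 1) := by
  unfold pvLens
  have h1 : cs.length + 1 - L = (cs.length - L) + 1 := by omega
  have h2 : cs.length + 1 - (L + 1) = cs.length - L := by omega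
  rw [h1, h2, List.range_succ_eq_map, List.map_cons, List.map_map]
  refine congrArg₂ _ (by omega) ?_
  apply List.map_congr_left
  intro k _
  simp only [Function.comp_apply]
  omega

theorem pvFoldl_blocks_nil (cs : List Char) (Ls : List Nat)
    (h : ∀ L' ∈ Ls, pvLBL cs L' = []) (b : Option (Int × Int × List Char)) :
    Ls.foldl (fun b' L' => (pvLBL cs L').foldl (pvStepT cs) b') b = b := by
  induction Ls generalizing b with
  | nil => rfl
  | cons L Ls ih =>
    rw [List.foldl_cons, h L (by simp)]
    exact ih (fun L' hL' => h L' (by simp [hL'])) b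

theorem pvMem_lens (cs : List Char) (L L' : Nat) (h : L' ∈ pvLens cs L) :
    L ≤ L' ∧ L' ≤ cs.length := by
  simp only [pvLens, List.mem_map, List.mem_range] at h
  obtain ⟨k, hk, rfl⟩ := h
  omega

theorem pvAltGo_eq (cs : List Char) :
    ∀ (fuel L : Nat) (b : Option (Int × Int × List Char)), 2 ≤ L →
      cs.length + 1 - L ≤ fuel →
      pvAltGo cs L b = (pvLens cs L).foldl (fun b' L' => (pvLBL cs L').foldl (pvStepT cs) b') b := by
  intro fuel
  induction fuel with
  | zero =>
    intro L b h2 hf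
    have hnL : ¬ L ≤ cs.length := by omega
    rw [pvAltGo, dif_neg hnL]
    have hz : cs.length + 1 - L = 0 := by omega
    unfold pvLens
    rw [hz]
    rfl
  | succ fuel ih =>
    intro L b h2 hf
    rw [pvAltGo]
    by_cases hL : L ≤ cs.length
    · rw [dif_pos hL]
      show (if (pvAltLen cs L b).1 = true then pvAltGo cs (L + 1) (pvAltLen cs L b).2.2
            else (pvAltLen cs L b).2.2) = _
      rw [pvAltLen_spec cs L hL b]
      by_cases hnd : (pvWs cs L (cs.length - L + 1)).Nodup
      · rw [if_neg (by simp [hnd])]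
        rw [pvLens_cons cs L hL, List.foldl_cons]
        rw [pvFoldl_blocks_nil cs (pvLens cs (L + 1))]
        intro L' hL'
        obtain ⟨hge, hle⟩ := pvMem_lens cs (L + 1) L' hL'
        exact pvLBL_nil_of_nodup cs L' (by omega) hle
          (pvNodup_ws_ge cs L L' (by omega) hnd)
      · rw [if_pos (by simp [hnd])]
        rw [ih (L + 1) _ (by omega) (by omega)]
        rw [pvLens_cons cs L hL, List.foldl_cons]
    · rw [dif_neg hL]
      have hz : cs.length + 1 - L = 0 := by omega
      unfold pvLens
      rw [hz]
      rfl

theorem pvBFull_fold (cs : List Char) (b : Option (Int × Int × List Char)) :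
    (pvLens cs 2).foldl (fun b' L' => (pvLBL cs L').foldl (pvStepT cs) b') b =
      (pvBFull cs).foldl (pvStepT cs) b := by
  unfold pvBFull
  generalize pvLens cs 2 = Ls
  induction Ls generalizing b with
  | nil => simp
  | cons L Ls ih =>
    rw [List.foldl_cons, List.map_cons, List.flatten_cons, List.foldl_append]
    exact ih _

theorem pvMapPick (cs : List Char) :
    ∀ (l : List (List Char)) (o : Option (List Char)),
      l.foldl (pvStepT cs) (o.map (pvEnc cs)) =
        (l.foldl (pvSel (pvBetterB cs)) o).map (pvEnc cs) := by
  intro l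
  induction l with
  | nil => intro o; simp
  | cons x l ih =>
    intro o
    have hstep : pvStepT cs (o.map (pvEnc cs)) x = (pvSel (pvBetterB cs) o x).map (pvEnc cs) := by
      cases o with
      | none => rfl
      | some m =>
        have hcond : (((pvEnc cs m).1 < ((pvCnt cs x : Int)) ∨
            (((pvCnt cs x : Int)) = (pvEnc cs m).1 ∧ (pvEnc cs m).2.1 < ((x.length : Int)))) ↔
            pvBetterB cs x m = true) := by
          rw [pvBB_iff]
          simp only [pvEnc, pvBetter]
          constructor
          · intro h; omega
          · intro h; omega
        show pvBestUpd ((pvCnt cs x : Int)) ((x.length : Int)) x (some (pvEnc cs m)) = _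
        rw [pvBestUpd]
        by_cases hb : pvBetterB cs x m
        · rw [if_pos (hcond.mpr hb)]
          simp only [pvSel, hb, if_true]
          rfl
        · rw [if_neg (fun hh => hb (hcond.mp hh))]
          simp only [pvSel, hb, if_false]
          rfl
    rw [List.foldl_cons, List.foldl_cons, hstep, ih]

theorem pvBFull_tie_pairwise (cs : List Char) :
    (pvBFull cs).Pairwise (fun m x => pvTie cs m x → pvI0 cs m < pvI0 cs x) := by
  unfold pvBFull
  rw [List.pairwise_flatten]
  constructor
  · intro l hl
    simp only [List.mem_map] at hl
    obtain ⟨L, hL, rfl⟩ := hl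
    obtain ⟨hge, hle⟩ := pvMem_lens cs 2 L hL
    exact pvLBL_tie_pairwise cs L (by omega) hle
  · have base : (pvLens cs 2).Pairwise (· < ·) := by
      unfold pvLens
      refine (List.pairwise_map).mpr ?_
      exact List.pairwise_lt_range.imp (by intro a b h; omega)
    refine (List.pairwise_map).mpr ?_
    refine List.Pairwise.imp_of_mem ?_ base
    intro L1 L2 h1 h2 hlt x hx y hy htie
    obtain ⟨hge1, hle1⟩ := pvMem_lens cs 2 L1 h1
    obtain ⟨hge2, hle2⟩ := pvMem_lens cs 2 L2 h2
    have hx' := (pvMemLBL cs x L1 (by omega) hle1).mp hx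
    have hy' := (pvMemLBL cs y L2 (by omega) hle2).mp hy
    exfalso
    have := htie.2
    omega

/-! Main equivalence. -/

theorem pvMain (cs : List Char) :
    (if (pvAIns cs PySem.Dict.empty ((pvPairsA cs).map (fun pr => pvWin cs pr.1 pr.2))).items = []
     then "no null"
     else
       match PySem.List.sorted2
           (pvAIns cs PySem.Dict.empty ((pvPairsA cs).map (fun pr => pvWin cs pr.1 pr.2))).keys
           (fun x => -((pvAIns cs PySem.Dict.empty ((pvPairsA cs).map (fun pr => pvWin cs pr.1 pr.2))).getD x 0))
           (fun x => -((x.length : Int))) with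
       | [] => "no null"
       | r :: _ => String.mk ("yes ".toList ++ r)) =
      (match pvAltGo cs 2 none with
       | none => "no null"
       | some b => String.mk ("yes ".toList ++ b.2.2)) := by
  set D := pvAIns cs PySem.Dict.empty ((pvPairsA cs).map (fun pr => pvWin cs pr.1 pr.2)) with hD
  have hkeys : D.keys = pvKeyList cs := by
    rw [hD, pvA_keys, pvOfList_filter, pvKeyList]
  have hget : ∀ p ∈ pvKeyList cs, D.getD p 0 = (pvCnt cs p : Int) := by
    intro p hp
    rw [hD, pvA_getD]
    have hp2 : p ∈ PySem.Set.ofList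
        ((((pvPairsA cs).map (fun pr => pvWin cs pr.1 pr.2))).filter (pvC cs)) := by
      rw [pvOfList_filter]
      exact hp
    rw [if_pos ((PySem.Set.mem_ofList _ _).mp hp2)]
  have hitems : D.items = [] ↔ pvKeyList cs = [] := by
    rw [← hkeys]
    simp only [PySem.Dict.keys]
    exact (List.map_eq_nil_iff).symm
  have hB : pvAltGo cs 2 none =
      ((pvBFull cs).foldl (pvSel (pvBetterB cs)) none).map (pvEnc cs) := by
    rw [pvAltGo_eq cs (cs.length + 1 - 2) 2 none (by omega) (by omega), pvBFull_fold]
    have h := pvMapPick cs (pvBFull cs) none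
    simpa using h
  have hBpick : (pvBFull cs).foldl (pvSel (pvBetterB cs)) none =
      (pvBFull cs).foldl (pvSel (pvBetter3B cs)) none :=
    pvPick1 cs _ none (pvBFull_tie_pairwise cs) (by intro m hm; cases hm)
  have hKpick : (pvKeyList cs).foldl (pvSel (pvBetterB cs)) none =
      (pvKeyList cs).foldl (pvSel (pvBetter3B cs)) none :=
    pvPick1 cs _ none (pvKeyList_tie_pairwise cs) (by intro m hm; cases hm)
  have heqKB : (pvKeyList cs).foldl (pvSel (pvBetter3B cs)) none =
      (pvBFull cs).foldl (pvSel (pvBetter3B cs)) none :=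
    pvPick_eq_of_mem cs _ _ (fun x hx => (pvMemKeyList cs x).mp hx)
      (fun x hx => (pvMemBFull cs x).mp hx)
      (fun p => by rw [pvMemKeyList, pvMemBFull])
  have hltB : ∀ x ∈ pvKeyList cs, ∀ m ∈ pvKeyList cs,
      (decide (-(D.getD x 0) < -(D.getD m 0)) ||
        (!decide (-(D.getD m 0) < -(D.getD x 0)) &&
          decide (-((x.length : Int)) < -((m.length : Int))))) = pvBetterB cs x m := by
    intro x hx m hm
    rw [hget x hx, hget m hm]
    rw [Bool.eq_iff_iff]
    simp only [pvBetterB, Bool.or_eq_true, Bool.and_eq_true, Bool.not_eq_true',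
      decide_eq_true_eq, decide_eq_false_iff_not]
    omega
  have hs2 : PySem.List.sorted2 (pvKeyList cs) (fun x => -(D.getD x 0))
      (fun x => -((x.length : Int))) =
      (pvKeyList cs).foldl
        (fun acc x => PySem.List.insertBy
          (fun a b => decide ((fun x => -(D.getD x 0)) a < (fun x => -(D.getD x 0)) b) ||
            !decide ((fun x => -(D.getD x 0)) b < (fun x => -(D.getD x 0)) a) &&
              decide ((fun x => -((x.length : Int))) a < (fun x => -((x.length : Int))) b)) x acc)
        [] := rfl
  have hhead : (PySem.List.sorted2 (pvKeyList cs) (fun x => -(D.getD x 0))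
      (fun x => -((x.length : Int)))).head? =
      (pvKeyList cs).foldl (pvSel (pvBetter3B cs)) none := by
    rw [hs2, pvHead?_foldl_insertBy]
    show (pvKeyList cs).foldl (pvSel _) none = _
    rw [pvFoldl_sel_congr _ (pvBetterB cs) (fun p => p ∈ pvKeyList cs)
      (fun x m hx hm => hltB x hx m hm) (pvKeyList cs) none (fun x hx => hx)
      (by intro m hm; cases hm)]
    exact hKpick
  rw [hkeys]
  by_cases hK : pvKeyList cs = []
  · rw [if_pos (hitems.mpr hK)]
    have hBF : pvBFull cs = [] := by
      rw [List.eq_nil_iff_forall_not_mem]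
      intro p hp
      have hmem := (pvMemKeyList cs p).mpr ((pvMemBFull cs p).mp hp)
      rw [hK] at hmem
      simp at hmem
    rw [hB, hBF]
    rfl
  · rw [if_neg (fun h => hK (hitems.mp h))]
    rcases hres : PySem.List.sorted2 (pvKeyList cs) (fun x => -(D.getD x 0))
        (fun x => -((x.length : Int))) with _ | ⟨r, t⟩
    · exfalso
      rw [hres] at hhead
      simp only [List.head?_nil] at hhead
      have := (pvPick_none_iff (pvBetter3B cs) (pvKeyList cs)).mp hhead.symm
      exact hK this
    · rw [hres] at hhead
      simp only [List.head?_cons] at hhead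
      have hBval : pvAltGo cs 2 none = some (pvEnc cs r) := by
        rw [hB, hBpick, ← heqKB, ← hhead]
        rfl
      rw [hBval]
      rfl

-- ===== VERDICT (by name: the statement is the Claim_ definition above) =====
theorem PatternChaser_spec : Claim_equal_PatternChaser := by
  unfold Claim_equal_PatternChaser
  intro s _
  unfold Spec_PatternChaser
  show PatternChaser s = PatternChaser_alt s
  simp only [PatternChaser, PatternChaser_alt]
  rw [pvA_hm s.toList]
  exact pvMain s.toList
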